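-- pv_equiv track=rewrite | github.com/phoenixday/advent-code-2024 | day9/main.py | move_files_to_the_left
-- ===== SOURCE A (Python) =====
-- from typing import List
--
-- FREE = -1
--
-- def move_files_to_the_left(full_map: List[int]) -> List[int]:
--     # we will swap indices instead of swaping right inside the string
--     indices = list(range(len(full_map)))
--     start, end = 0, len(full_map) - 1
--     while start < end:
--         while start < end and full_map[start] != FREE:
--             start += 1
--         while end > start and full_map[end] == FREE:
--             end -= 1
--         indices[start], indices[end] = indices[end], indices[start]
--         start += 1
--         end -= 1
--     swaped_map = []
--     for i in indices:
--         swaped_map.append(full_map[i])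
--     return swaped_map
-- ===== SOURCE B (Python) =====
-- from typing import List
--
-- FREE = -1
--
-- def move_files_to_the_left(full_map: List[int]) -> List[int]:
--     # collect the non-free values once, then fill the first k slots with
--     # two pointers into that value list: kept files from the front,
--     # moved files from the back; the tail is all free space
--     vals = [x for x in full_map if x != FREE]
--     k = len(vals)
--     result = []
--     front = 0
--     back = k - 1
--     for x in full_map[:k]:
--         if x != FREE:
--             result.append(vals[front])
--             front += 1
--         else:
--             result.append(vals[back])
--             back -= 1
--     return result + [FREE] * (len(full_map) - k)
-- ===== Notes on version B (the rewrite author's own statement) =====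
-- stated objective: simpler
-- what changed: A builds an index permutation by repeated inward swaps of an indices array (nested while loops) and then dereferences it; B never builds a permutation: it extracts the list of non-free values once and fills the first k positions with two pointers into that value list (front for kept files, back for moved ones), appending the free tail directly.
import Mathlib
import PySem

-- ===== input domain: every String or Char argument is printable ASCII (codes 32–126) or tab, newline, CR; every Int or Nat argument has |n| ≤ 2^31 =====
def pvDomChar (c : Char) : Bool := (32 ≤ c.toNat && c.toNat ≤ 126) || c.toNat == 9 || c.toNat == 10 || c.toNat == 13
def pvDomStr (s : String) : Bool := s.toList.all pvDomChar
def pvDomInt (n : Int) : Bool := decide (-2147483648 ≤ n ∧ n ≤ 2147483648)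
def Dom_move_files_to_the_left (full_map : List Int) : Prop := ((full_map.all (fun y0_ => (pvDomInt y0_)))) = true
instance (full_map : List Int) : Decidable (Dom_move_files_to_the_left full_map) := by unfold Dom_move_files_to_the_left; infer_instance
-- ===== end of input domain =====

-- B replaces A's inward-swap construction of an index permutation by a one-pass fill
-- from the extracted non-free value list with front/back pointers (objective: simpler).

-- ===== PORT A =====

-- full_map[i] for an Int index; in every execution of A the index is in range,
-- so the `.getD 0` default is never the value used (exact on all reached indices).
def pvDeref (l : List Int) (i : Int) : Int := (PySem.List.pyGet? l i).getD 0

-- `while start < end and full_map[start] != FREE: start += 1`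
def pvFindStart (fm : List Int) (start e : Int) : Int :=
  if _h : start < e ∧ pvDeref fm start ≠ -1 then pvFindStart fm (start + 1) e else start
termination_by (e - start).toNat
decreasing_by omega

-- `while end > start and full_map[end] == FREE: end -= 1`
def pvFindEnd (fm : List Int) (s e : Int) : Int :=
  if _h : e > s ∧ pvDeref fm e = -1 then pvFindEnd fm s (e - 1) else e
termination_by (e - s).toNat
decreasing_by omega

-- bounds lemmas cited by pvOuter's decreasing_by
theorem pvFindStart_ge (fm : List Int) (start e : Int) : start ≤ pvFindStart fm start e := by
  unfold pvFindStart
  split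
  · have := pvFindStart_ge fm (start + 1) e; omega
  · omega
termination_by (e - start).toNat
decreasing_by omega

theorem pvFindEnd_le (fm : List Int) (s e : Int) : pvFindEnd fm s e ≤ e := by
  unfold pvFindEnd
  split
  · have := pvFindEnd_le fm s (e - 1); omega
  · omega
termination_by (e - s).toNat
decreasing_by omega

-- the outer `while start < end` loop of A, acting on the indices list.
-- Every position written is provably a nonnegative in-range index, so `.toNat`/`List.set`
-- coincide with Python's indexed assignment on all reached states.
def pvOuter (fm idx : List Int) (start e : Int) : List Int :=
  if _h : start < e then
    let s := pvFindStart fm start e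
    let e' := pvFindEnd fm s e
    let a := pvDeref idx s
    let b := pvDeref idx e'
    pvOuter fm ((idx.set s.toNat b).set e'.toNat a) (s + 1) (e' - 1)
  else idx
termination_by (e - start).toNat
decreasing_by
  have h1 := pvFindStart_ge fm start e
  have h2 := pvFindEnd_le fm (pvFindStart fm start e) e
  omega

def move_files_to_the_left (full_map : List Int) : List Int :=
  (pvOuter full_map (PySem.List.pyRange 0 full_map.length 1) 0 ((full_map.length : Int) - 1)).map
    (pvDeref full_map)

-- ===== PORT B =====
def move_files_to_the_left_alt (full_map : List Int) : List Int :=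
  let vals := full_map.filter (fun x => x ≠ -1)
  let k : Int := vals.length
  let st := (PySem.List.slice full_map none (some k)).foldl
    (fun (acc : List Int × Int × Int) x =>
      if x ≠ -1 then (acc.1 ++ [pvDeref vals acc.2.1], acc.2.1 + 1, acc.2.2)
      else (acc.1 ++ [pvDeref vals acc.2.2], acc.2.1, acc.2.2 - 1))
    ([], 0, k - 1)
  -- `[FREE] * (len(full_map) - k)`: k ≤ len(full_map), so Nat subtraction is exact
  st.1 ++ List.replicate (full_map.length - vals.length) (-1)

-- ===== PRECONDITION & SPEC =====
def Spec_move_files_to_the_left (full_map : List Int) (out : List Int) : Prop := out = move_files_to_the_left_alt full_map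
instance (full_map : List Int) (out : List Int) : Decidable (Spec_move_files_to_the_left full_map out) := by unfold Spec_move_files_to_the_left; infer_instance

-- ===== CLAIM (what is proved, stated in full; the proofs are below) =====
def Claim_equal_move_files_to_the_left : Prop := ∀ (full_map : List Int), Dom_move_files_to_the_left full_map → Spec_move_files_to_the_left full_map (move_files_to_the_left full_map)


-- ===== LEMMAS AND PROOFS =====

-- Common specification: compact by decomposing into
-- (non-free prefix p) ++ -1 :: mid ++ (last non-free value v) :: (free suffix fr).
def pvS (l : List Int) : List Int :=
  let p := l.takeWhile (fun x => x != -1)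
  let r := l.dropWhile (fun x => x != -1)
  let fr := r.reverse.takeWhile (fun x => x == -1)
  match _h : r.reverse.dropWhile (fun x => x == -1) with
  | [] => l
  | v :: midrev => p ++ v :: pvS (midrev.reverse.tail) ++ List.replicate (fr.length + 1) (-1)
termination_by l.length
decreasing_by
  have h1 : (l.dropWhile (fun x => x != -1)).reverse.dropWhile (fun x => x == -1)
      = v :: midrev := _h
  have h2 := List.length_dropWhile_le (p := fun x => x == -1)
      (l := (l.dropWhile (fun x => x != -1)).reverse)
  have h3 := List.length_dropWhile_le (p := fun x => x != -1) (l := l)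
  rw [h1] at h2
  simp only [List.length_cons, List.length_reverse] at h2
  have h4 : midrev.reverse.tail.length ≤ midrev.length := by
    simp [List.length_tail]
  simp only [List.length_reverse] at *
  omega

-- every list has one of the two shapes
theorem pvDecomp (l : List Int) :
    (∃ p fr : List Int, (∀ x ∈ p, x ≠ -1) ∧ (∀ x ∈ fr, x = -1) ∧ l = p ++ fr) ∨
    (∃ p mid : List Int, ∃ v : Int, ∃ fr : List Int,
      (∀ x ∈ p, x ≠ -1) ∧ v ≠ -1 ∧ (∀ x ∈ fr, x = -1) ∧ l = p ++ -1 :: mid ++ v :: fr) := by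
  induction l with
  | nil => exact Or.inl ⟨[], [], by simp, by simp, rfl⟩
  | cons x t ih =>
    by_cases hx : x = -1
    case neg =>
      rcases ih with ⟨p, fr, hp, hfr, rfl⟩ | ⟨p, mid, v, fr, hp, hv, hfr, rfl⟩
      · exact Or.inl ⟨x :: p, fr, by simpa [hx] using hp, hfr, rfl⟩
      · exact Or.inr ⟨x :: p, mid, v, fr, by simpa [hx] using hp, hv, hfr, rfl⟩
    case pos =>
      subst hx
      rcases ih with ⟨p, fr, hp, hfr, rfl⟩ | ⟨p, mid, v, fr, hp, hv, hfr, rfl⟩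
      · match p, hp with
        | [], _ => exact Or.inl ⟨[], -1 :: fr, by simp, by simpa using hfr, rfl⟩
        | y :: p', hp =>
          have hne : (y :: p') ≠ [] := by simp
          refine Or.inr ⟨[], (y :: p').dropLast, (y :: p').getLast hne, fr, by simp,
            hp _ (List.getLast_mem hne), hfr, ?_⟩
          have h5 := List.dropLast_append_getLast hne
          simp only [List.nil_append]
          conv_lhs => rw [show (y :: p') = (y :: p').dropLast ++ [(y :: p').getLast hne] from h5.symm]
          simp
      · match p, hp with
        | [], _ => exact Or.inr ⟨[], -1 :: mid, v, fr, by simp, hv, hfr, by simp⟩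
        | y :: p', hp =>
          refine Or.inr ⟨[], (y :: p') ++ -1 :: mid, v, fr, by simp, hv, hfr, by simp⟩

theorem pvTake_all_cons {a : Type} (p : a → Bool) (l₁ l₂ : List a) (y : a)
    (h1 : ∀ x ∈ l₁, p x = true) (h2 : p y = false) : (l₁ ++ y :: l₂).takeWhile p = l₁ := by
  induction l₁ with
  | nil => simp [List.takeWhile_cons, h2]
  | cons c t ih =>
    simp only [List.cons_append, List.takeWhile_cons, h1 c (by simp)]
    simp [ih (fun x hx => h1 x (by simp [hx]))]

theorem pvDrop_all_cons {a : Type} (p : a → Bool) (l₁ l₂ : List a) (y : a)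
    (h1 : ∀ x ∈ l₁, p x = true) (h2 : p y = false) : (l₁ ++ y :: l₂).dropWhile p = y :: l₂ := by
  induction l₁ with
  | nil => simp [List.dropWhile_cons, h2]
  | cons c t ih =>
    simp only [List.cons_append, List.dropWhile_cons, h1 c (by simp)]
    simp [ih (fun x hx => h1 x (by simp [hx]))]

theorem pvDrop_all {a : Type} (p : a → Bool) (l : List a)
    (h1 : ∀ x ∈ l, p x = true) : l.dropWhile p = [] := by
  induction l with
  | nil => simp
  | cons c t ih =>
    simp only [List.dropWhile_cons, h1 c (by simp)]
    simp [ih (fun x hx => h1 x (by simp [hx]))]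

theorem pvS_flat (p fr : List Int) (hp : ∀ x ∈ p, x ≠ -1) (hfr : ∀ x ∈ fr, x = -1) :
    pvS (p ++ fr) = p ++ fr := by
  have hbp : ∀ x ∈ p, (fun x => x != -1) x = true := by intro x hx; simpa using hp x hx
  have hr : (p ++ fr).dropWhile (fun x => x != -1) = fr := by
    cases fr with
    | nil => simpa using pvDrop_all (fun x => x != -1) p hbp
    | cons f fr' =>
      exact pvDrop_all_cons (fun x => x != -1) p fr' f hbp (by simpa using hfr f (by simp))
  have hrr : ((p ++ fr).dropWhile (fun x => x != -1)).reverse.dropWhile (fun x => x == -1)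
      = [] := by
    rw [hr]
    exact pvDrop_all (fun x => x == -1) _ (by intro x hx; simpa using hfr x (List.mem_reverse.mp hx))
  rw [pvS]
  split
  · rfl
  · rename_i v midrev heq
    rw [hrr] at heq
    cases heq

theorem pvS_decomp (p mid : List Int) (v : Int) (fr : List Int)
    (hp : ∀ x ∈ p, x ≠ -1) (hv : v ≠ -1) (hfr : ∀ x ∈ fr, x = -1) :
    pvS (p ++ -1 :: mid ++ v :: fr) = p ++ v :: pvS mid ++ List.replicate (fr.length + 1) (-1) := by
  have hbp : ∀ x ∈ p, (fun x => x != -1) x = true := by intro x hx; simpa using hp x hx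
  rw [show ((p ++ -1 :: mid ++ v :: fr : List Int)) = p ++ -1 :: (mid ++ v :: fr) by simp]
  have htw : (p ++ -1 :: (mid ++ v :: fr)).takeWhile (fun x => x != -1) = p :=
    pvTake_all_cons (fun x => x != -1) p (mid ++ v :: fr) (-1) hbp (by simp)
  have hr : (p ++ -1 :: (mid ++ v :: fr)).dropWhile (fun x => x != -1) = -1 :: (mid ++ v :: fr) :=
    pvDrop_all_cons (fun x => x != -1) p (mid ++ v :: fr) (-1) hbp (by simp)
  have hrev : (-1 :: (mid ++ v :: fr)).reverse = fr.reverse ++ v :: (mid.reverse ++ [-1]) := by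
    simp
  have hfrb : ∀ x ∈ fr.reverse, (fun x => x == -1) x = true := by
    intro x hx; simpa using hfr x (List.mem_reverse.mp hx)
  have hrr : ((p ++ -1 :: (mid ++ v :: fr)).dropWhile (fun x => x != -1)).reverse.dropWhile
      (fun x => x == -1) = v :: (mid.reverse ++ [-1]) := by
    rw [hr, hrev]
    exact pvDrop_all_cons (fun x => x == -1) fr.reverse (mid.reverse ++ [-1]) v hfrb
      (by simpa using hv)
  have htr : ((p ++ -1 :: (mid ++ v :: fr)).dropWhile (fun x => x != -1)).reverse.takeWhile
      (fun x => x == -1) = fr.reverse := by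
    rw [hr, hrev]
    exact pvTake_all_cons (fun x => x == -1) fr.reverse (mid.reverse ++ [-1]) v hfrb
      (by simpa using hv)
  rw [pvS]
  split
  · rename_i heq
    rw [hrr] at heq
    cases heq
  · rename_i v1 midrev heq
    rw [hrr] at heq
    injection heq with h1 h2
    subst h1
    subst h2
    rw [htw, htr]
    simp

-- ---- B side: the fold is an emit-style recursion ----

def pvEmit (vals : List Int) (xs : List Int) (f b : Int) : List Int :=
  match xs with
  | [] => []
  | x :: t => if x ≠ -1 then pvDeref vals f :: pvEmit vals t (f + 1) b
              else pvDeref vals b :: pvEmit vals t f (b - 1)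

theorem pvFold_emit (vals : List Int) : ∀ (xs acc : List Int) (f b : Int),
    (xs.foldl (fun (acc : List Int × Int × Int) x =>
      if x ≠ -1 then (acc.1 ++ [pvDeref vals acc.2.1], acc.2.1 + 1, acc.2.2)
      else (acc.1 ++ [pvDeref vals acc.2.2], acc.2.1, acc.2.2 - 1)) (acc, f, b)).1
    = acc ++ pvEmit vals xs f b := by
  intro xs
  induction xs with
  | nil => intro acc f b; simp [pvEmit]
  | cons x t ih =>
    intro acc f b
    rw [List.foldl_cons]
    by_cases hx : x = -1
    · rw [if_neg (by simp [hx]), ih, pvEmit, if_neg (by simp [hx])]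
      simp
    · rw [if_pos hx, ih, pvEmit, if_pos hx]
      simp

theorem pvDeref_append_length (pre : List Int) (y : Int) (ys : List Int) :
    pvDeref (pre ++ y :: ys) (pre.length : Int) = y := by
  simp [pvDeref, PySem.List.pyGet?_append_length]

theorem pvDeref_nat (l : List Int) (i : Nat) (h : i < l.length) :
    pvDeref l (i : Int) = l[i] := by
  simp [pvDeref, PySem.List.pyGet?_natCast, List.getElem?_eq_getElem h]

theorem pvDeref_middle (A m Z : List Int) (i : Int) (h0 : 0 ≤ i) (h1 : i < (m.length : Int)) :
    pvDeref (A ++ m ++ Z) ((A.length : Int) + i) = pvDeref m i := by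
  obtain ⟨j, rfl⟩ : ∃ j : Nat, i = (j : Int) := ⟨i.toNat, by omega⟩
  have hj : j < m.length := by exact_mod_cast h1
  rw [show ((A.length : Int) + (j : Int)) = ((A.length + j : Nat) : Int) by push_cast; ring]
  simp only [pvDeref, PySem.List.pyGet?_natCast]
  rw [List.getElem?_append_left (by simp <;> omega), List.getElem?_append_right (by omega)]
  simp

theorem pvEmit_front : ∀ (p A rest xs : List Int) (b : Int), (∀ x ∈ p, x ≠ -1) →
    pvEmit (A ++ p ++ rest) (p ++ xs) (A.length : Int) b
      = p ++ pvEmit (A ++ p ++ rest) xs ((A.length : Int) + p.length) b := by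
  intro p
  induction p with
  | nil => intro A rest xs b _; simp
  | cons c p' ih =>
    intro A rest xs b hp
    have hc : c ≠ -1 := hp c (by simp)
    rw [show A ++ (c :: p') ++ rest = (A ++ [c]) ++ p' ++ rest by simp]
    show pvEmit ((A ++ [c]) ++ p' ++ rest) (c :: (p' ++ xs)) (A.length : Int) b = _
    rw [pvEmit, if_pos hc]
    have hd : pvDeref ((A ++ [c]) ++ p' ++ rest) (A.length : Int) = c := by
      rw [show (A ++ [c]) ++ p' ++ rest = A ++ c :: (p' ++ rest) by simp]
      exact pvDeref_append_length A c (p' ++ rest)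
    rw [hd, show ((A.length : Int) + 1) = (((A ++ [c]).length : Nat) : Int) by simp]
    rw [ih (A ++ [c]) rest xs b (fun x hx => hp x (by simp [hx]))]
    have harg : (((A ++ [c]).length : Nat) : Int) + (p'.length : Int)
        = (A.length : Int) + ((c :: p').length : Int) := by
      simp; omega
    rw [harg]
    simp

theorem pvEmit_mid : ∀ (w : List Int) (A m Z : List Int) (f b : Int),
    0 ≤ f → b < (m.length : Int) →
    f + (w.countP (fun x => x != -1) : Int) ≤ (m.length : Int) →
    (w.countP (fun x => x == -1) : Int) ≤ b + 1 →
    pvEmit (A ++ m ++ Z) w ((A.length : Int) + f) ((A.length : Int) + b) = pvEmit m w f b := by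
  intro w
  induction w with
  | nil => intro A m Z f b _ _ _ _; simp [pvEmit]
  | cons x t ih =>
    intro A m Z f b hf hb hnf hfr
    by_cases hx : x = -1
    · have hcNF : (x :: t).countP (fun x => x != -1) = t.countP (fun x => x != -1) := by
        simp [hx]
      have hcF : (x :: t).countP (fun x => x == -1) = t.countP (fun x => x == -1) + 1 := by
        simp [hx]
      rw [hcNF] at hnf
      rw [hcF] at hfr
      push_cast at hnf hfr
      have hb0 : 0 ≤ b := by
        have h0 : (0:Int) ≤ (t.countP (fun x => x == -1) : Int) := by positivity
        omega
      rw [pvEmit, if_neg (by simp [hx]), pvEmit, if_neg (by simp [hx])]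
      rw [pvDeref_middle A m Z b hb0 hb]
      rw [show ((A.length : Int) + b - 1) = (A.length : Int) + (b - 1) by ring]
      rw [ih A m Z f (b - 1) hf (by omega) (by omega) (by omega)]
    · have hcNF : (x :: t).countP (fun x => x != -1) = t.countP (fun x => x != -1) + 1 := by
        simp [hx]
      have hcF : (x :: t).countP (fun x => x == -1) = t.countP (fun x => x == -1) := by
        simp [hx]
      rw [hcNF] at hnf
      rw [hcF] at hfr
      push_cast at hnf hfr
      have hfm : f < (m.length : Int) := by
        have h0 : (0:Int) ≤ (t.countP (fun x => x != -1) : Int) := by positivity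
        omega
      rw [pvEmit, if_pos hx, pvEmit, if_pos hx]
      rw [pvDeref_middle A m Z f hf hfm]
      rw [show ((A.length : Int) + f + 1) = (A.length : Int) + (f + 1) by ring]
      rw [ih A m Z (f + 1) b (by omega) hb (by omega) (by omega)]

-- unfolding of port B to the emit recursion
theorem pvAlt_emit (l : List Int) :
    move_files_to_the_left_alt l
      = pvEmit (l.filter (fun x => x ≠ -1)) (l.take (l.filter (fun x => x ≠ -1)).length) 0
          (((l.filter (fun x => x ≠ -1)).length : Int) - 1)
        ++ List.replicate (l.length - (l.filter (fun x => x ≠ -1)).length) (-1) := by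
  show (List.foldl (fun (acc : List Int × Int × Int) x =>
      if x ≠ -1 then (acc.1 ++ [pvDeref (l.filter (fun x => x ≠ -1)) acc.2.1], acc.2.1 + 1, acc.2.2)
      else (acc.1 ++ [pvDeref (l.filter (fun x => x ≠ -1)) acc.2.2], acc.2.1, acc.2.2 - 1))
      ([], 0, ((l.filter (fun x => x ≠ -1)).length : Int) - 1)
      (PySem.List.slice l none (some ((l.filter (fun x => x ≠ -1)).length : Int)))).1
    ++ List.replicate (l.length - (l.filter (fun x => x ≠ -1)).length) (-1) = _
  rw [PySem.List.slice_to_natCast, pvFold_emit]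
  simp

theorem pvAlt_flat (p fr : List Int) (hp : ∀ x ∈ p, x ≠ -1) (hfr : ∀ x ∈ fr, x = -1) :
    move_files_to_the_left_alt (p ++ fr) = pvS (p ++ fr) := by
  have hfilp : p.filter (fun x => x ≠ -1) = p :=
    List.filter_eq_self.mpr (by intro x hx; simpa using hp x hx)
  have hfilfr : fr.filter (fun x => x ≠ -1) = [] := by
    rw [List.filter_eq_nil_iff]
    intro a ha; simpa using hfr a ha
  have hfil : (p ++ fr).filter (fun x => x ≠ -1) = p := by
    rw [List.filter_append, hfilp, hfilfr, List.append_nil]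
  rw [pvAlt_emit, hfil, List.take_left]
  have hemit : pvEmit p p 0 ((p.length : Int) - 1) = p := by
    have h := pvEmit_front p [] [] [] ((p.length : Int) - 1) hp
    simpa [pvEmit] using h
  rw [hemit]
  have hlen : (p ++ fr).length - p.length = fr.length := by simp
  rw [hlen, pvS_flat p fr hp hfr]
  have : List.replicate fr.length (-1 : Int) = fr := (List.eq_replicate_of_mem hfr).symm
  rw [this]

theorem pvAlt_eq_pvS : ∀ (n : Nat) (l : List Int), l.length ≤ n →
    move_files_to_the_left_alt l = pvS l := by
  intro n
  induction n with
  | zero =>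
    intro l hl
    have hnil : l = [] := by cases l with | nil => rfl | cons a t => simp at hl
    subst hnil
    simpa using pvAlt_flat [] [] (by simp) (by simp)
  | succ n ih =>
    intro l hl
    rcases pvDecomp l with ⟨p, fr, hp, hfr, rfl⟩ | ⟨p, mid, v, fr, hp, hv, hfr, rfl⟩
    · exact pvAlt_flat p fr hp hfr
    · -- l = (p ++ (-1 :: mid)) ++ (v :: fr)
      have hmidlen : mid.length ≤ n := by simp at hl; omega
      have hmidS := ih mid hmidlen
      have hfilp : p.filter (fun x => x ≠ -1) = p :=
        List.filter_eq_self.mpr (by intro x hx; simpa using hp x hx)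
      have hfilfr : fr.filter (fun x => x ≠ -1) = [] := by
        rw [List.filter_eq_nil_iff]; intro a ha; simpa using hfr a ha
      have hfil : (p ++ -1 :: mid ++ v :: fr).filter (fun x => x ≠ -1)
          = (p ++ mid.filter (fun x => x ≠ -1)) ++ [v] := by
        rw [List.filter_append, List.filter_append, hfilp]
        rw [List.filter_cons_of_neg (by simp), List.filter_cons_of_pos (by simpa using hv), hfilfr]
      have hmle : (mid.filter (fun x => x ≠ -1)).length ≤ mid.length := List.length_filter_le _ _
      set mf := mid.filter (fun x => x ≠ -1) with hmf
      set w := mid.take mf.length with hw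
      have hwlen : w.length = mf.length := by
        rw [hw, List.length_take]; omega
      have hklen : ((p ++ mf) ++ [v]).length = p.length + (mf.length + 1) := by simp
      have htake : (p ++ -1 :: mid ++ v :: fr).take (((p ++ mf) ++ [v]).length)
          = p ++ (-1 :: w) := by
        rw [hklen]
        rw [show (p ++ -1 :: mid ++ v :: fr : List Int) = p ++ (-1 :: (mid ++ v :: fr)) by simp]
        rw [List.take_length_add_append, List.take_succ_cons, List.take_append_of_le_length hmle]
      rw [pvAlt_emit, hfil, htake]
      have hemit1 : pvEmit ((p ++ mf) ++ [v]) (p ++ (-1 :: w)) 0 ((((p ++ mf) ++ [v]).length : Int) - 1)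
          = p ++ pvEmit ((p ++ mf) ++ [v]) (-1 :: w) (p.length : Int) ((((p ++ mf) ++ [v]).length : Int) - 1) := by
        have h := pvEmit_front p [] (mf ++ [v]) (-1 :: w) ((((p ++ mf) ++ [v]).length : Int) - 1) hp
        simpa using h
      rw [hemit1]
      have hderef : pvDeref ((p ++ mf) ++ [v]) ((((p ++ mf) ++ [v]).length : Int) - 1) = v := by
        have h1 : ((((p ++ mf) ++ [v]).length : Int) - 1) = ((p ++ mf).length : Int) := by
          simp; omega
        rw [h1]
        exact pvDeref_append_length (p ++ mf) v []
      have hemit2 : pvEmit ((p ++ mf) ++ [v]) (-1 :: w) (p.length : Int) ((((p ++ mf) ++ [v]).length : Int) - 1)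
          = v :: pvEmit ((p ++ mf) ++ [v]) w (p.length : Int) ((((p ++ mf) ++ [v]).length : Int) - 2) := by
        rw [pvEmit, if_neg (by simp), hderef]
        have : ((((p ++ mf) ++ [v]).length : Int) - 1 - 1) = ((((p ++ mf) ++ [v]).length : Int) - 2) := by ring
        rw [this]
      rw [hemit2]
      have hemit3 : pvEmit ((p ++ mf) ++ [v]) w (p.length : Int) ((((p ++ mf) ++ [v]).length : Int) - 2)
          = pvEmit mf w 0 ((mf.length : Int) - 1) := by
        have h1 : ((p.length : Nat) : Int) = (p.length : Int) + 0 := by ring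
        have h2 : ((((p ++ mf) ++ [v]).length : Int) - 2) = (p.length : Int) + ((mf.length : Int) - 1) := by
          simp; omega
        rw [h1, h2]
        exact pvEmit_mid w p mf [v] 0 ((mf.length : Int) - 1) (by omega) (by
            have := hwlen; omega) (by
            have hc := List.countP_le_length (l := w) (p := fun x => x != -1)
            push_cast; omega) (by
            have hc := List.countP_le_length (l := w) (p := fun x => x == -1)
            push_cast; omega)
      rw [hemit3]
      have hrep : (p ++ -1 :: mid ++ v :: fr).length - ((p ++ mf) ++ [v]).length
          = (mid.length - mf.length) + (fr.length + 1) := by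
        simp; omega
      rw [hrep, List.replicate_add]
      have hS := pvS_decomp p mid v fr hp hv hfr
      rw [hS, ← hmidS, pvAlt_emit mid, ← hmf, ← hw]
      simp

-- ---- A side: characterizing the scans and the swap loop ----

theorem pvSet_mid (l₁ l₂ : List Int) (n : Nat) (x : Int) :
    (l₁ ++ l₂).set (l₁.length + n) x = l₁ ++ l₂.set n x := by
  induction l₁ with
  | nil => simp
  | cons c t ih =>
    simp only [List.cons_append, List.length_cons]
    rw [show t.length + 1 + n = (t.length + n) + 1 by omega]
    simp [ih]

theorem pvSet_at (l₁ : List Int) (c x : Int) (t : List Int) :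
    (l₁ ++ c :: t).set l₁.length x = l₁ ++ x :: t := by
  have h := pvSet_mid l₁ (c :: t) 0 x
  simpa using h

theorem pvSet_self (l : List Int) (n : Nat) (v : Int) (h : l[n]? = some v) : l.set n v = l := by
  apply List.ext_getElem?
  intro i
  by_cases hi : i = n
  · subst hi; rw [List.getElem?_set_self']; rw [h]; rfl
  · rw [List.getElem?_set_ne (by omega)]

theorem pvDerefIdx (idx : List Int) (j : Nat) (t : Int) (h : idx[j]? = some t) :
    pvDeref idx (j : Int) = t := by
  simp [pvDeref, PySem.List.pyGet?_natCast, h]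

theorem pvFindStart_stop (fm : List Int) (s e : Int) (h : ¬(s < e ∧ pvDeref fm s ≠ -1)) :
    pvFindStart fm s e = s := by
  rw [pvFindStart, dif_neg h]

theorem pvFindEnd_stop (fm : List Int) (s e : Int) (h : ¬(e > s ∧ pvDeref fm e = -1)) :
    pvFindEnd fm s e = e := by
  rw [pvFindEnd, dif_neg h]

theorem pvFindStart_skip : ∀ (p A rest : List Int) (e : Int), (∀ x ∈ p, x ≠ -1) →
    ((A.length : Int) + p.length ≤ e) →
    pvFindStart (A ++ p ++ rest) (A.length : Int) e
      = pvFindStart (A ++ p ++ rest) ((A.length : Int) + p.length) e := by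
  intro p
  induction p with
  | nil => intro A rest e _ _; simp
  | cons c p' ih =>
    intro A rest e hp he
    have hc : c ≠ -1 := hp c (by simp)
    have hd : pvDeref (A ++ (c :: p') ++ rest) (A.length : Int) = c := by
      rw [show A ++ (c :: p') ++ rest = A ++ c :: (p' ++ rest) by simp]
      exact pvDeref_append_length A c (p' ++ rest)
    have hlt : (A.length : Int) < e := by
      have : (0:Int) ≤ (p'.length : Int) := by positivity
      simp only [List.length_cons] at he; push_cast at he; omega
    rw [pvFindStart, dif_pos ⟨hlt, by rw [hd]; exact hc⟩]
    have hre : A ++ (c :: p') ++ rest = (A ++ [c]) ++ p' ++ rest := by simp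
    rw [show ((A.length : Int) + 1) = (((A ++ [c]).length : Nat) : Int) by simp]
    rw [hre, ih (A ++ [c]) rest e (fun x hx => hp x (by simp [hx])) (by simp at he ⊢; push_cast; omega)]
    congr 1
    simp
    omega

theorem pvFindStart_cap : ∀ (p A rest : List Int) (e : Int), (∀ x ∈ p, x ≠ -1) →
    ((A.length : Int) ≤ e) → (e ≤ (A.length : Int) + p.length) →
    pvFindStart (A ++ p ++ rest) (A.length : Int) e = e := by
  intro p
  induction p with
  | nil =>
    intro A rest e _ h1 h2
    have : e = (A.length : Int) := by simp at h2; omega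
    subst this
    exact pvFindStart_stop _ _ _ (by omega)
  | cons c p' ih =>
    intro A rest e hp h1 h2
    by_cases heq : e = (A.length : Int)
    · subst heq; exact pvFindStart_stop _ _ _ (by omega)
    · have hc : c ≠ -1 := hp c (by simp)
      have hd : pvDeref (A ++ (c :: p') ++ rest) (A.length : Int) = c := by
        rw [show A ++ (c :: p') ++ rest = A ++ c :: (p' ++ rest) by simp]
        exact pvDeref_append_length A c (p' ++ rest)
      rw [pvFindStart, dif_pos ⟨by omega, by rw [hd]; exact hc⟩]
      have hre : A ++ (c :: p') ++ rest = (A ++ [c]) ++ p' ++ rest := by simp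
      rw [show ((A.length : Int) + 1) = (((A ++ [c]).length : Nat) : Int) by simp]
      rw [hre]
      exact ih (A ++ [c]) rest e (fun x hx => hp x (by simp [hx])) (by simp <;> omega)
        (by simp at h2 ⊢; push_cast; omega)

theorem pvFindEnd_skip : ∀ (t : Nat) (fm : List Int) (s e : Int),
    (∀ j : Int, e - t < j → j ≤ e → pvDeref fm j = -1) → s ≤ e - t →
    pvFindEnd fm s e = pvFindEnd fm s (e - t) := by
  intro t
  induction t with
  | zero => intro fm s e _ _; simp
  | succ t ih =>
    intro fm s e hj hs
    have h1 : pvDeref fm e = -1 := hj e (by push_cast; omega) (by omega)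
    rw [pvFindEnd, dif_pos ⟨by push_cast at hs; omega, h1⟩]
    rw [ih fm s (e - 1) (fun j hj1 hj2 => hj j (by push_cast at hj1 ⊢; omega) (by omega))
      (by push_cast at hs ⊢; omega)]
    congr 1
    push_cast
    ring

-- the deref-map of an indices list that is the identity on the window [|A|, |A|+|wv|)
theorem pvMapDeref_decomp (A wv Z idx : List Int)
    (hlen : idx.length = ((A ++ wv) ++ Z).length)
    (hid : ∀ i : Nat, A.length ≤ i → i < A.length + wv.length → idx[i]? = some (i : Int)) :
    idx.map (pvDeref ((A ++ wv) ++ Z))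
      = (idx.map (pvDeref ((A ++ wv) ++ Z))).take A.length ++ wv
        ++ (idx.map (pvDeref ((A ++ wv) ++ Z))).drop (A.length + wv.length) := by
  have hmid : (idx.map (pvDeref ((A ++ wv) ++ Z))).drop A.length
      = wv ++ (idx.map (pvDeref ((A ++ wv) ++ Z))).drop (A.length + wv.length) := by
    have hseg : ((idx.map (pvDeref ((A ++ wv) ++ Z))).drop A.length).take wv.length = wv := by
      apply List.ext_getElem
      · simp at hlen ⊢
        omega
      · intro i h1 h2
        rw [List.getElem_take, List.getElem_drop, List.getElem_map]
        have hidx : idx[A.length + i]? = some ((A.length + i : Nat) : Int) :=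
          hid (A.length + i) (by omega) (by omega)
        have hval : idx[A.length + i]'(by simp at hlen; omega) = ((A.length + i : Nat) : Int) := by
          have := List.getElem?_eq_getElem (l := idx) (i := A.length + i) (by simp at hlen; omega)
          rw [hidx] at this
          exact (Option.some_inj.mp this.symm)
        rw [hval]
        rw [show (((A.length + i : Nat) : Int)) = ((A.length : Int) + (i : Int)) by push_cast; ring]
        rw [pvDeref_middle A wv Z (i : Int) (by positivity) (by exact_mod_cast h2)]
        exact pvDeref_nat wv i h2
    conv_lhs => rw [← List.take_append_drop wv.length ((idx.map (pvDeref ((A ++ wv) ++ Z))).drop A.length)]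
    rw [hseg, List.drop_drop]
  conv_lhs => rw [← List.take_append_drop A.length (idx.map (pvDeref ((A ++ wv) ++ Z))), hmid]
  simp

-- pure-list assembly step for the swap case
theorem pvAssemble (P p mid S : List Int) (v : Int) (fr Q : List Int)
    (hfr : ∀ x ∈ fr, x = -1) :
    ((((P ++ (p ++ -1 :: mid ++ v :: fr)) ++ Q).set (P.length + p.length) v).set
        (P.length + p.length + 1 + mid.length) (-1)).take (P.length + p.length + 1) ++ S ++
      ((((P ++ (p ++ -1 :: mid ++ v :: fr)) ++ Q).set (P.length + p.length) v).set
        (P.length + p.length + 1 + mid.length) (-1)).drop (P.length + p.length + 1 + mid.length)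
      = P ++ (p ++ v :: S ++ List.replicate (fr.length + 1) (-1)) ++ Q := by
  have h1 : (P ++ (p ++ -1 :: mid ++ v :: fr)) ++ Q
      = (P ++ p) ++ (-1 :: (mid ++ (v :: (fr ++ Q)))) := by simp
  have h2 : P.length + p.length = (P ++ p).length := by simp
  rw [h1, h2, pvSet_at]
  have h3 : (P ++ p) ++ v :: (mid ++ (v :: (fr ++ Q)))
      = (((P ++ p) ++ [v]) ++ mid) ++ (v :: (fr ++ Q)) := by simp
  have h4 : (P ++ p).length + 1 + mid.length = ((((P ++ p) ++ [v]) ++ mid)).length := by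
    simp; omega
  rw [h3, h4, pvSet_at]
  have h5 : (((P ++ p) ++ [v]) ++ mid) ++ (-1 :: (fr ++ Q))
      = ((P ++ p) ++ [v]) ++ (mid ++ (-1 :: (fr ++ Q))) := by simp
  have h6 : (P ++ p).length + 1 = ((P ++ p) ++ [v]).length := by simp <;> omega
  rw [List.drop_left]
  rw [h6]
  conv_lhs => rw [h5, List.take_left]
  have h7 : List.replicate (fr.length + 1) (-1 : Int) = -1 :: fr := by
    rw [List.replicate_succ]
    rw [← List.eq_replicate_of_mem hfr]
  rw [h7]
  simp

-- the outer loop on a window [|A|, |A|+|wv|) on which idx is the identity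
theorem pvOuter_window : ∀ (n : Nat) (wv : List Int), wv.length ≤ n → ∀ (A Z idx : List Int),
    idx.length = ((A ++ wv) ++ Z).length →
    (∀ i : Nat, A.length ≤ i → i < A.length + wv.length → idx[i]? = some (i : Int)) →
    (pvOuter ((A ++ wv) ++ Z) idx (A.length : Int) ((A.length : Int) + wv.length - 1)).map
        (pvDeref ((A ++ wv) ++ Z))
      = (idx.map (pvDeref ((A ++ wv) ++ Z))).take A.length ++ pvS wv
        ++ (idx.map (pvDeref ((A ++ wv) ++ Z))).drop (A.length + wv.length) := by
  intro n
  induction n with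
  | zero =>
    intro wv hwv A Z idx hlen hid
    have hnil : wv = [] := List.eq_nil_of_length_eq_zero (by omega)
    subst hnil
    rw [pvOuter, dif_neg (by push_cast; omega)]
    have hU := pvMapDeref_decomp A [] Z idx hlen hid
    rw [show pvS [] = ([] : List Int) from by simpa using pvS_flat [] [] (by simp) (by simp)]
    exact hU
  | succ n ih =>
    intro wv hwv A Z idx hlen hid
    by_cases hbig : ((A.length : Int) < (A.length : Int) + wv.length - 1)
    case neg =>
      rw [pvOuter, dif_neg hbig]
      have hU := pvMapDeref_decomp A wv Z idx hlen hid
      have hwv1 : wv.length ≤ 1 := by push_cast at hbig; omega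
      have hS : pvS wv = wv := by
        match wv, hwv1 with
        | [], _ => simpa using pvS_flat [] [] (by simp) (by simp)
        | [x], _ =>
          by_cases hx : x = -1
          · simpa using pvS_flat [] [x] (by simp) (by simp [hx])
          · simpa using pvS_flat [x] [] (by simp [hx]) (by simp)
      rw [hS]
      exact hU
    case pos =>
      have hwv2 : 2 ≤ wv.length := by push_cast at hbig; omega
      rcases pvDecomp wv with ⟨p, fr, hp, hfr, hwveq⟩ | ⟨p, mid, v, fr, hp, hv, hfr, hwveq⟩
      · -- flat window: the two scans meet, the swap is a no-op and the loop stops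
        subst hwveq
        cases fr with
        | nil =>
          rw [List.append_nil] at hwv hlen hid hbig hwv2 ⊢
          have hs : pvFindStart ((A ++ p) ++ Z) (A.length : Int)
              ((A.length : Int) + (p.length : Int) - 1) = (A.length : Int) + (p.length : Int) - 1 :=
            pvFindStart_cap p A Z _ hp (by push_cast; omega) (by push_cast; omega)
          have he : pvFindEnd ((A ++ p) ++ Z) ((A.length : Int) + (p.length : Int) - 1)
              ((A.length : Int) + (p.length : Int) - 1) = (A.length : Int) + (p.length : Int) - 1 :=
            pvFindEnd_stop _ _ _ (by omega)
          rw [pvOuter, dif_pos hbig]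
          simp only [hs, he]
          have ha : pvDeref idx ((A.length : Int) + (p.length : Int) - 1)
              = ((A.length + p.length - 1 : Nat) : Int) := by
            rw [show ((A.length : Int) + (p.length : Int) - 1) = ((A.length + p.length - 1 : Nat) : Int)
              by push_cast [Nat.cast_sub (by omega : 1 ≤ A.length + p.length)]; omega]
            exact pvDerefIdx idx _ _ (hid _ (by omega) (by omega))
          rw [ha, List.set_set]
          rw [show ((A.length : Int) + (p.length : Int) - 1).toNat = A.length + p.length - 1 by omega]
          rw [pvSet_self idx _ _ (hid _ (by omega) (by omega))]
          rw [pvOuter, dif_neg (by omega)]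
          rw [show pvS p = p from by simpa using pvS_flat p [] hp (by simp)]
          exact pvMapDeref_decomp A p Z idx hlen hid
        | cons f fr' =>
          have hf : f = -1 := hfr f (by simp)
          have hds : ∀ W : List Int, W = (A ++ p) ++ f :: (fr' ++ Z) →
              pvDeref W ((A.length : Int) + (p.length : Int)) = f := by
            intro W hW
            subst hW
            rw [show ((A.length : Int) + (p.length : Int)) = (((A ++ p).length : Nat) : Int) by simp]
            exact pvDeref_append_length _ _ _
          have hs : pvFindStart ((A ++ (p ++ f :: fr')) ++ Z) (A.length : Int)
              ((A.length : Int) + ((p ++ f :: fr').length : Int) - 1)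
              = (A.length : Int) + (p.length : Int) := by
            rw [show (A ++ (p ++ f :: fr')) ++ Z = A ++ p ++ ((f :: fr') ++ Z) by simp]
            rw [pvFindStart_skip p A ((f :: fr') ++ Z) _ hp (by push_cast; simp <;> omega)]
            apply pvFindStart_stop
            rintro ⟨-, hne⟩
            exact hne (by
              rw [hds (A ++ p ++ ((f :: fr') ++ Z)) (by simp)]
              exact hf)
          have he : pvFindEnd ((A ++ (p ++ f :: fr')) ++ Z)
              ((A.length : Int) + (p.length : Int))
              ((A.length : Int) + ((p ++ f :: fr').length : Int) - 1)
              = (A.length : Int) + (p.length : Int) := by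
            rw [pvFindEnd_skip fr'.length _ _ _ ?_ (by push_cast; simp <;> omega)]
            · rw [show ((A.length : Int) + ((p ++ f :: fr').length : Int) - 1 - (fr'.length : Int))
                = (A.length : Int) + (p.length : Int) by push_cast; simp <;> omega]
              exact pvFindEnd_stop _ _ _ (by omega)
            · intro j hj1 hj2
              push_cast [List.length_append, List.length_cons] at hj1 hj2
              obtain ⟨i, hji, hi1, hi2⟩ : ∃ i : Nat, j = (((A ++ p).length : Nat) : Int) + (i : Int)
                  ∧ 1 ≤ i ∧ i ≤ fr'.length := by
                refine ⟨(j - (((A ++ p).length : Nat) : Int)).toNat, by push_cast; simp <;> omega,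
                  by simp <;> omega, by simp <;> omega⟩
              rw [hji, show (A ++ (p ++ f :: fr')) ++ Z = (A ++ p) ++ (f :: fr') ++ Z by simp]
              rw [pvDeref_middle (A ++ p) (f :: fr') Z (i : Int) (by positivity) (by push_cast; simp <;> omega)]
              rw [pvDeref_nat (f :: fr') i (by simp <;> omega)]
              exact hfr _ (List.getElem_mem _)
          rw [pvOuter, dif_pos hbig]
          simp only [hs, he]
          have ha : pvDeref idx ((A.length : Int) + (p.length : Int))
              = ((A.length + p.length : Nat) : Int) := by
            rw [show ((A.length : Int) + (p.length : Int)) = ((A.length + p.length : Nat) : Int)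
              by push_cast; ring]
            exact pvDerefIdx idx _ _ (hid _ (by omega) (by simp <;> omega))
          rw [ha, List.set_set]
          rw [show ((A.length : Int) + (p.length : Int)).toNat = A.length + p.length by omega]
          rw [pvSet_self idx _ _ (hid _ (by omega) (by simp <;> omega))]
          rw [pvOuter, dif_neg (by omega)]
          rw [show pvS (p ++ f :: fr') = p ++ f :: fr' from pvS_flat p (f :: fr') hp hfr]
          exact pvMapDeref_decomp A (p ++ f :: fr') Z idx hlen hid
      · -- window p ++ -1 :: mid ++ v :: fr: swap the first free and last used cells, recurse on mid
        subst hwveq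
        have hs0 : pvFindStart ((A ++ (p ++ -1 :: mid ++ v :: fr)) ++ Z) (A.length : Int)
            ((A.length : Int) + ((p ++ -1 :: mid ++ v :: fr).length : Int) - 1)
            = (A.length : Int) + (p.length : Int) := by
          rw [show (A ++ (p ++ -1 :: mid ++ v :: fr)) ++ Z
            = A ++ p ++ ((-1 :: mid ++ v :: fr) ++ Z) by simp]
          rw [pvFindStart_skip p A ((-1 :: mid ++ v :: fr) ++ Z) _ hp (by push_cast; simp <;> omega)]
          apply pvFindStart_stop
          rintro ⟨-, hne⟩
          apply hne
          rw [show A ++ p ++ ((-1 :: mid ++ v :: fr) ++ Z)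
            = (A ++ p) ++ (-1) :: ((mid ++ v :: fr) ++ Z) by simp]
          rw [show ((A.length : Int) + (p.length : Int)) = (((A ++ p).length : Nat) : Int) by simp]
          exact pvDeref_append_length _ _ _
        have hs : pvFindStart ((A ++ (p ++ -1 :: mid ++ v :: fr)) ++ Z) (A.length : Int)
            ((A.length : Int) + ((p ++ -1 :: mid ++ v :: fr).length : Int) - 1)
            = ((A.length + p.length : Nat) : Int) := by rw [hs0]; push_cast; ring
        have he : pvFindEnd ((A ++ (p ++ -1 :: mid ++ v :: fr)) ++ Z)
            ((A.length + p.length : Nat) : Int)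
            ((A.length : Int) + ((p ++ -1 :: mid ++ v :: fr).length : Int) - 1)
            = ((A.length + p.length + 1 + mid.length : Nat) : Int) := by
          rw [pvFindEnd_skip fr.length _ _ _ ?_ (by push_cast; simp <;> omega)]
          · rw [show ((A.length : Int) + ((p ++ -1 :: mid ++ v :: fr).length : Int) - 1 - (fr.length : Int))
              = ((A.length + p.length + 1 + mid.length : Nat) : Int) by push_cast; simp <;> omega]
            apply pvFindEnd_stop
            rintro ⟨-, habs⟩
            apply hv
            rw [show (A ++ (p ++ -1 :: mid ++ v :: fr)) ++ Z
              = ((A ++ p) ++ (-1 :: mid)) ++ v :: (fr ++ Z) by simp] at habs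
            rw [show ((A.length + p.length + 1 + mid.length : Nat) : Int)
              = ((((A ++ p) ++ (-1 :: mid)).length : Nat) : Int) by push_cast; simp <;> omega] at habs
            rw [pvDeref_append_length _ _ _] at habs
            exact habs
          · intro j hj1 hj2
            push_cast [List.length_append, List.length_cons] at hj1 hj2
            obtain ⟨i, hji, hi2⟩ : ∃ i : Nat,
                j = (((((A ++ p) ++ (-1 :: mid)) ++ [v]).length : Nat) : Int) + (i : Int)
                ∧ i < fr.length := by
              refine ⟨(j - ((((A ++ p) ++ (-1 :: mid)) ++ [v]).length : Int)).toNat, ?_, ?_⟩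
              · push_cast; simp <;> omega
              · simp <;> omega
            rw [hji, show (A ++ (p ++ -1 :: mid ++ v :: fr)) ++ Z
              = (((A ++ p) ++ (-1 :: mid)) ++ [v]) ++ fr ++ Z by simp]
            rw [pvDeref_middle _ fr Z (i : Int) (by positivity) (by push_cast; omega)]
            rw [pvDeref_nat fr i hi2]
            exact hfr _ (List.getElem_mem _)
        rw [pvOuter, dif_pos hbig]
        simp only [hs, he]
        have ha : pvDeref idx ((A.length + p.length : Nat) : Int)
            = ((A.length + p.length : Nat) : Int) :=
          pvDerefIdx idx _ _ (hid _ (by omega) (by simp <;> omega))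
        have hb : pvDeref idx ((A.length + p.length + 1 + mid.length : Nat) : Int)
            = ((A.length + p.length + 1 + mid.length : Nat) : Int) :=
          pvDerefIdx idx _ _ (hid _ (by omega) (by simp <;> omega))
        rw [ha, hb]
        simp only [Int.toNat_natCast]
        -- the recursive call is the window lemma for mid
        have hmidn : mid.length ≤ n := by simp at hwv; omega
        have hlen' : ((idx.set (A.length + p.length) ((A.length + p.length + 1 + mid.length : Nat) : Int)).set
              (A.length + p.length + 1 + mid.length) ((A.length + p.length : Nat) : Int)).length
            = (((((A ++ p) ++ [-1]) ++ mid) ++ ((v :: fr) ++ Z))).length := by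
          simp at hlen ⊢
          omega
        have hid' : ∀ i : Nat, ((A ++ p) ++ [-1]).length ≤ i →
            i < ((A ++ p) ++ [-1]).length + mid.length →
            ((idx.set (A.length + p.length) ((A.length + p.length + 1 + mid.length : Nat) : Int)).set
              (A.length + p.length + 1 + mid.length) ((A.length + p.length : Nat) : Int))[i]?
              = some (i : Int) := by
          intro i h1 h2
          simp only [List.length_append, List.length_cons, List.length_nil] at h1 h2
          rw [List.getElem?_set_ne (by omega), List.getElem?_set_ne (by omega)]
          exact hid i (by omega) (by simp <;> omega)
        have hIH := ih mid hmidn ((A ++ p) ++ [-1]) ((v :: fr) ++ Z)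
          ((idx.set (A.length + p.length) ((A.length + p.length + 1 + mid.length : Nat) : Int)).set
            (A.length + p.length + 1 + mid.length) ((A.length + p.length : Nat) : Int)) hlen' hid'
        have hU := pvMapDeref_decomp A (p ++ -1 :: mid ++ v :: fr) Z idx hlen hid
        rw [show (A ++ (p ++ -1 :: mid ++ v :: fr)) ++ Z
          = (((A ++ p) ++ [-1]) ++ mid) ++ ((v :: fr) ++ Z) by simp] at hU ⊢
        rw [show (((A.length + p.length : Nat) : Int) + 1)
          = ((((A ++ p) ++ [-1]).length : Nat) : Int) by push_cast; simp <;> omega]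
        rw [show (((A.length + p.length + 1 + mid.length : Nat) : Int) - 1)
          = ((((A ++ p) ++ [-1]).length : Nat) : Int) + (mid.length : Int) - 1 by push_cast; simp <;> omega]
        rw [hIH]
        rw [pvS_decomp p mid v fr hp hv hfr]
        obtain ⟨P, hP⟩ : ∃ P, (idx.map (pvDeref ((((A ++ p) ++ [-1]) ++ mid) ++ ((v :: fr) ++ Z)))).take A.length = P := ⟨_, rfl⟩
        obtain ⟨Q, hQ⟩ : ∃ Q, (idx.map (pvDeref ((((A ++ p) ++ [-1]) ++ mid) ++ ((v :: fr) ++ Z)))).drop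
            (A.length + (p ++ -1 :: mid ++ v :: fr).length) = Q := ⟨_, rfl⟩
        have hPlen : P.length = A.length := by
          rw [← hP]
          simp at hlen ⊢
          omega
        rw [hP, hQ] at hU ⊢
        have hds2 : pvDeref ((((A ++ p) ++ [-1]) ++ mid) ++ ((v :: fr) ++ Z))
            ((A.length + p.length : Nat) : Int) = -1 := by
          rw [show (((A ++ p) ++ [-1]) ++ mid) ++ ((v :: fr) ++ Z)
            = (A ++ p) ++ (-1) :: (mid ++ (v :: fr) ++ Z) by simp]
          rw [show ((A.length + p.length : Nat) : Int) = (((A ++ p).length : Nat) : Int) by simp]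
          exact pvDeref_append_length _ _ _
        have hde2 : pvDeref ((((A ++ p) ++ [-1]) ++ mid) ++ ((v :: fr) ++ Z))
            ((A.length + p.length + 1 + mid.length : Nat) : Int) = v := by
          rw [show (((A ++ p) ++ [-1]) ++ mid) ++ ((v :: fr) ++ Z)
            = ((A ++ p) ++ (-1 :: mid)) ++ v :: (fr ++ Z) by simp]
          rw [show ((A.length + p.length + 1 + mid.length : Nat) : Int)
            = ((((A ++ p) ++ (-1 :: mid)).length : Nat) : Int) by push_cast; simp <;> omega]
          exact pvDeref_append_length _ _ _
        rw [List.map_set, List.map_set, hds2, hde2, hU]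
        rw [show A.length + p.length = P.length + p.length by omega]
        rw [show ((A ++ p) ++ ([-1] : List Int)).length = P.length + p.length + 1 by simp [hPlen] <;> omega]
        exact pvAssemble P p mid (pvS mid) v fr Q hfr

theorem pvA_eq_pvS (fm : List Int) : move_files_to_the_left fm = pvS fm := by
  unfold move_files_to_the_left
  have hlen : (PySem.List.pyRange 0 fm.length 1).length = (([] ++ fm) ++ ([] : List Int)).length := by
    rw [PySem.List.pyRange_one]
    simp
  have hid : ∀ i : Nat, ([] : List Int).length ≤ i → i < ([] : List Int).length + fm.length →
      (PySem.List.pyRange 0 fm.length 1)[i]? = some (i : Int) := by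
    intro i _ h2
    rw [PySem.List.pyRange_one]
    simp at h2
    simp [h2]
  have h := pvOuter_window fm.length fm le_rfl [] [] (PySem.List.pyRange 0 fm.length 1) hlen hid
  simp only [List.nil_append, List.append_nil, List.length_nil, Nat.cast_zero, Nat.zero_add,
    Int.zero_add, zero_add, List.take_zero, List.drop_eq_nil_of_le] at h
  rw [h]
  have hdrop : ((PySem.List.pyRange 0 fm.length 1).map (pvDeref fm)).drop fm.length = [] := by
    apply List.drop_eq_nil_of_le
    rw [List.length_map, PySem.List.pyRange_one]
    simp
  rw [hdrop]
  simp

-- ===== VERDICT (by name: the statement is the Claim_ definition above) =====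
theorem move_files_to_the_left_spec : Claim_equal_move_files_to_the_left := by
  intro full_map _
  unfold Spec_move_files_to_the_left
  rw [pvA_eq_pvS full_map, pvAlt_eq_pvS full_map.length full_map le_rfl]
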